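-- pv_equiv track=rewrite | github.com/shibam120302/GFG_POTD | Unequal Arrays.py | solve
-- ===== SOURCE A (Python) =====
-- from typing import List
-- from collections import defaultdict
--
-- def solve(N : int, A : List[int], B : List[int]) -> int:
--     # code here
--     ssum = 0
--     ap = defaultdict(list)
--     bp = defaultdict(list)
--     for i in range(N):
--         ssum += A[i] - B[i]
--         ap[abs(A[i]) % 2].append(A[i])
--         bp[abs(B[i]) % 2].append(B[i])
--
--     if ssum != 0 or int(len(ap[0])) != int(len(bp[0])):
--         return -1
--
--     ans = 0
--     for i in range(2):
--         ap[i].sort()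
--         bp[i].sort()
--
--         for j in range(len(ap[i])):
--             ans += abs(ap[i][j] - bp[i][j]) // 2
--
--     return ans // 2
-- ===== SOURCE B (Python) =====
-- from typing import List
--
-- def solve(N : int, A : List[int], B : List[int]) -> int:
--     # CDF-sweep (1D optimal transport) instead of sort-and-pair: per parity class,
--     # merge A-values (+1) and B-values (-1) as signed events, sort the events once,
--     # and sweep a running balance; sum of |balance|*gap equals the total pair cost.
--     diff = 0
--     events = ([], [])            # events[c]: (value, +1/-1) for values of parity c
--     for i in range(N):
--         x, y = A[i], B[i]
--         diff += x - y
--         events[x % 2].append((x, 1))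
--         events[y % 2].append((y, -1))
--     if diff != 0 or sum(d for _, d in events[0]) != 0:
--         return -1
--     total = 0
--     for ev in events:
--         ev.sort()
--         bal = 0
--         prev = 0
--         for v, d in ev:
--             total += abs(bal) * (v - prev)
--             bal += d
--             prev = v
--     return total // 4
-- ===== Notes on version B (the rewrite author's own statement) =====
-- stated objective: alternative
-- what changed: Replaces A's parity-bucketed sorts with pairing by index by a signed-event CDF sweep per parity class: A-values (+1) and B-values (-1) are merged into one event list, sorted once, and a running-balance sweep accumulates |balance|*gap (1D optimal-transport formula); no element is ever paired with another.
import Mathlib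
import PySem

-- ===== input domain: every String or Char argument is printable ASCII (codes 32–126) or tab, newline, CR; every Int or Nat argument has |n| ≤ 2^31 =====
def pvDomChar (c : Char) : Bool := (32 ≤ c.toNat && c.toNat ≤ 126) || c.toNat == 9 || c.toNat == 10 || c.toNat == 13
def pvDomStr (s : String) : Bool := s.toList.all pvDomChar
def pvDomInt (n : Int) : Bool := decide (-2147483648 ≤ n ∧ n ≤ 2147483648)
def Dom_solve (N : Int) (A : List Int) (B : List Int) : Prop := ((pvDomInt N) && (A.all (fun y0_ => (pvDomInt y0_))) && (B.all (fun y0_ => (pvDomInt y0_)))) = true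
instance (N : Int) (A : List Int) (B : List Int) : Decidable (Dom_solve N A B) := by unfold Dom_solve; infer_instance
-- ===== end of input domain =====

-- B replaces A's parity-bucketed sorts with index pairing by a signed-event CDF sweep per parity
-- class (merge A-values as +1 and B-values as -1, sort the events once, accumulate |balance|*gap);
-- objective: alternative algorithm of the same cost.

-- ===== PORT A =====
def solve (N : Int) (A : List Int) (B : List Int) : Int :=
  -- ssum/ap/bp loop over range(N); defaultdict(list) appends = Dict.modify with default []
  let st := (PySem.List.pyRange 0 N 1).foldl (fun s i =>
      (s.1 + (PySem.List.pyGetD A i 0 - PySem.List.pyGetD B i 0),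
       PySem.Dict.modify s.2.1 (PySem.Int.mod |PySem.List.pyGetD A i 0| 2) [] (fun l => l ++ [PySem.List.pyGetD A i 0]),
       PySem.Dict.modify s.2.2 (PySem.Int.mod |PySem.List.pyGetD B i 0| 2) [] (fun l => l ++ [PySem.List.pyGetD B i 0])))
    ((0 : Int), (PySem.Dict.empty : PySem.Dict Int (List Int)), (PySem.Dict.empty : PySem.Dict Int (List Int)))
  if st.1 ≠ 0 ∨ (PySem.Dict.getD st.2.1 0 []).length ≠ (PySem.Dict.getD st.2.2 0 []).length then -1
  else
    let ans := (PySem.List.pyRange 0 2 1).foldl (fun ans i =>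
      let sa := PySem.List.sorted (PySem.Dict.getD st.2.1 i []) (fun x => x) false
      let sb := PySem.List.sorted (PySem.Dict.getD st.2.2 i []) (fun x => x) false
      (PySem.List.pyRange 0 (sa.length : Int) 1).foldl (fun ans j =>
        ans + PySem.Int.floordiv |PySem.List.pyGetD sa j 0 - PySem.List.pyGetD sb j 0| 2) ans) 0
    PySem.Int.floordiv ans 2

-- ===== PORT B =====
-- the inner sweep step: total += abs(bal) * (v - prev); bal += d; prev = v
def pvSweepStep (s : Int × Int × Int) (p : Int × Int) : Int × Int × Int :=
  (s.1 + |s.2.1| * (p.1 - s.2.2), s.2.1 + p.2, p.1)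

def solve_alt (N : Int) (A : List Int) (B : List Int) : Int :=
  -- events is a pair of lists; events[x % 2].append(...) is an if on the parity (x % 2 ∈ {0,1})
  let st := (PySem.List.pyRange 0 N 1).foldl (fun s i =>
      (s.1 + (PySem.List.pyGetD A i 0 - PySem.List.pyGetD B i 0),
       (if PySem.Int.mod (PySem.List.pyGetD B i 0) 2 == 0
          then (if PySem.Int.mod (PySem.List.pyGetD A i 0) 2 == 0
                then s.2.1 ++ [(PySem.List.pyGetD A i 0, (1 : Int))] else s.2.1)
               ++ [(PySem.List.pyGetD B i 0, (-1 : Int))]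
          else (if PySem.Int.mod (PySem.List.pyGetD A i 0) 2 == 0
                then s.2.1 ++ [(PySem.List.pyGetD A i 0, (1 : Int))] else s.2.1)),
       (if PySem.Int.mod (PySem.List.pyGetD B i 0) 2 == 0
          then (if PySem.Int.mod (PySem.List.pyGetD A i 0) 2 == 0
                then s.2.2 else s.2.2 ++ [(PySem.List.pyGetD A i 0, (1 : Int))])
          else (if PySem.Int.mod (PySem.List.pyGetD A i 0) 2 == 0
                then s.2.2 else s.2.2 ++ [(PySem.List.pyGetD A i 0, (1 : Int))])
               ++ [(PySem.List.pyGetD B i 0, (-1 : Int))])))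
    ((0 : Int), ([] : List (Int × Int)), ([] : List (Int × Int)))
  if st.1 ≠ 0 ∨ (st.2.1.map (fun p => p.2)).sum ≠ 0 then -1
  else
    let total := [st.2.1, st.2.2].foldl (fun total ev =>
      ((PySem.List.sorted2 ev (fun p => p.1) (fun p => p.2) false).foldl pvSweepStep (total, 0, 0)).1) 0
    PySem.Int.floordiv total 4

-- ===== PRECONDITION & SPEC =====
-- exactly the inputs on which A returns normally: A raises IndexError when N exceeds a length
def Pre_solve (N : Int) (A : List Int) (B : List Int) : Prop :=
  N ≤ (A.length : Int) ∧ N ≤ (B.length : Int)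
instance (N : Int) (A : List Int) (B : List Int) : Decidable (Pre_solve N A B) := by unfold Pre_solve; infer_instance
def pvWitness_solve : Int × List Int × List Int := (2, [1, 2], [3, 0])

def Spec_solve (N : Int) (A : List Int) (B : List Int) (out : Int) : Prop := out = solve_alt N A B
instance (N : Int) (A : List Int) (B : List Int) (out : Int) : Decidable (Spec_solve N A B out) := by unfold Spec_solve; infer_instance

-- ===== CLAIM (what is proved, stated in full; the proofs are below) =====
def Claim_equal_solve : Prop := ∀ (N : Int) (A : List Int) (B : List Int), Dom_solve N A B → Pre_solve N A B → Spec_solve N A B (solve N A B)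

-- ===== LEMMAS AND PROOFS =====

-- proof-only helpers: indicator, signed CDF of an event list, and the per-parity event builders
def pvChi (x t : Int) : Int := if x ≤ t then 1 else 0
def pvF (E : List (Int × Int)) (t : Int) : Int := (E.map (fun p => if p.1 ≤ t then p.2 else 0)).sum
def pvG0 (p : Int × Int) : List (Int × Int) :=
  (if PySem.Int.mod p.1 2 == 0 then [(p.1, (1 : Int))] else [])
    ++ (if PySem.Int.mod p.2 2 == 0 then [(p.2, (-1 : Int))] else [])
def pvG1 (p : Int × Int) : List (Int × Int) :=
  (if PySem.Int.mod p.1 2 == 0 then [] else [(p.1, (1 : Int))])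
    ++ (if PySem.Int.mod p.2 2 == 0 then [] else [(p.2, (-1 : Int))])

-- |x| % 2 = x % 2 (Python %)
lemma pv_mod_abs (x : Int) : PySem.Int.mod |x| 2 = PySem.Int.mod x 2 := by
  rw [PySem.Int.mod_eq_emod_of_pos (by omega), PySem.Int.mod_eq_emod_of_pos (by omega)]
  rcases abs_cases x with ⟨h, _⟩ | ⟨h, _⟩ <;> (rw [h]; try omega)

-- an index loop over the first M elements of two lists is a fold over the zip of their takes
lemma pv_foldl_idx_zip {σ : Type} (xs ys : List Int) (M : Int)
    (hx : M ≤ (xs.length : Int)) (hy : M ≤ (ys.length : Int)) (f : σ → Int → Int → σ) (init : σ) :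
    (PySem.List.pyRange 0 M 1).foldl
      (fun s j => f s (PySem.List.pyGetD xs j 0) (PySem.List.pyGetD ys j 0)) init
    = ((xs.take M.toNat).zip (ys.take M.toNat)).foldl (fun s p => f s p.1 p.2) init := by
  rcases lt_or_ge M 0 with hM | h0
  · rw [PySem.List.pyRange_one_eq_nil (by omega)]
    have : M.toNat = 0 := by omega
    simp [this]
  set Z := (xs.take M.toNat).zip (ys.take M.toNat) with hZdef
  have hZ : (Z.length : Int) = M := by
    rw [hZdef]; simp [List.length_zip]; omega
  have h1 : (PySem.List.pyRange 0 M 1).foldl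
      (fun s j => f s (PySem.List.pyGetD xs j 0) (PySem.List.pyGetD ys j 0)) init
      = (PySem.List.pyRange 0 M 1).foldl
      (fun s j => (fun s (p : Int × Int) => f s p.1 p.2) s (PySem.List.pyGetD Z j (0, 0))) init := by
    apply PySem.List.foldl_congr_mem
    intro acc j hj
    rw [PySem.List.mem_pyRange_one] at hj
    have hjx : j < (xs.length : Int) := by omega
    have hjy : j < (ys.length : Int) := by omega
    have hjz : j < (Z.length : Int) := by omega
    rw [PySem.List.pyGetD_eq_getElem _ _ hj.1 hjx, PySem.List.pyGetD_eq_getElem _ _ hj.1 hjy,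
        PySem.List.pyGetD_eq_getElem _ _ hj.1 hjz]
    simp only [hZdef, List.getElem_zip]
    simp [List.getElem_take]
  rw [h1, ← hZ]
  have h2 := PySem.List.foldl_pyRange_pyGetD' Z ((0 : Int), (0 : Int))
    (fun s p => f s p.1 p.2) init (le_refl 0)
  simpa using h2

-- sum of pairwise differences over a zip of equal-length lists
lemma pv_sum_zip_sub (xs ys : List Int) (h : ys.length = xs.length) :
    ((xs.zip ys).map (fun p => p.1 - p.2)).sum = xs.sum - ys.sum := by
  induction xs generalizing ys with
  | nil => cases ys <;> simp_all
  | cons x xs ih =>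
    cases ys with
    | nil => simp at h
    | cons y ys =>
      simp only [List.zip_cons_cons, List.map_cons, List.sum_cons, List.length_cons] at *
      rw [ih ys (by omega)]; ring

-- the grouping loop: parity group c is the parity-c filter, in first-occurrence order
lemma pv_getD_group (l : List Int) (c : Int) :
    PySem.Dict.getD
      (l.foldl (fun d x => PySem.Dict.modify d (PySem.Int.mod |x| 2) [] (fun t => t ++ [x]))
        PySem.Dict.empty) c []
    = l.filter (fun x => PySem.Int.mod x 2 == c) := by
  have h1 : l.foldl (fun d x => PySem.Dict.modify d (PySem.Int.mod |x| 2) [] (fun t => t ++ [x]))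
        PySem.Dict.empty
      = (l.map (fun x => (PySem.Int.mod x 2, x))).foldl
          (fun d q => PySem.Dict.modify d q.1 [] (fun t => t ++ [q.2])) PySem.Dict.empty := by
    rw [List.foldl_map]
    exact PySem.List.foldl_congr_mem _ _ _ _ (fun acc x _ => by rw [pv_mod_abs])
  rw [h1, PySem.Dict.getD_foldl_modify_append, PySem.Dict.getD_empty, List.filter_map]
  simp [List.map_map, Function.comp_def]

-- length of the complementary filter
lemma pv_length_filter_not (l : List Int) (p : Int → Bool) :
    (l.filter (fun x => !(p x))).length = l.length - (l.filter p).length := by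
  induction l with
  | nil => rfl
  | cons x l ih =>
    have := List.length_filter_le p l
    by_cases hx : p x <;> (simp [hx, ih]; try omega)

-- A's inner index loop over the two sorted groups is a sum over their zip
lemma pv_inner (u v : List Int) (hlen : v.length = u.length) (acc : Int) :
    (PySem.List.pyRange 0 ((PySem.List.sorted u (fun x => x) false).length : Int) 1).foldl
      (fun ans j => ans + PySem.Int.floordiv
        |PySem.List.pyGetD (PySem.List.sorted u (fun x => x) false) j 0
          - PySem.List.pyGetD (PySem.List.sorted v (fun x => x) false) j 0| 2) acc
    = acc + (((PySem.List.sorted u (fun x => x) false).zip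
        (PySem.List.sorted v (fun x => x) false)).map
        (fun p => PySem.Int.floordiv |p.1 - p.2| 2)).sum := by
  have h1 := pv_foldl_idx_zip (PySem.List.sorted u (fun x => x) false)
    (PySem.List.sorted v (fun x => x) false)
    ((PySem.List.sorted u (fun x => x) false).length : Int)
    le_rfl (by rw [PySem.List.length_sorted, PySem.List.length_sorted, hlen])
    (fun s x y => s + PySem.Int.floordiv |x - y| 2) acc
  simp only [Int.toNat_natCast, List.take_length] at h1
  rw [h1, PySem.List.foldl_add,
    List.take_of_length_le (le_of_eq (by rw [PySem.List.length_sorted, PySem.List.length_sorted, hlen]))]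

-- ===== generic sum plumbing =====

lemma pv_sum_map_sub {α : Type} (l : List α) (f g : α → Int) :
    (l.map (fun x => f x - g x)).sum = (l.map f).sum - (l.map g).sum := by
  induction l with
  | nil => simp
  | cons x l ih => simp only [List.map_cons, List.sum_cons, ih]; ring

lemma pv_sum_map_if {α : Type} (l : List α) (p : α → Bool) (f : α → Int) :
    (l.map (fun x => if p x then f x else 0)).sum = ((l.filter p).map f).sum := by
  induction l with
  | nil => simp
  | cons x l ih => by_cases hx : p x <;> simp [hx, ih]

lemma pv_sum_map_flatMap {α β : Type} (l : List α) (g : α → List β) (f : β → Int) :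
    ((l.flatMap g).map f).sum = (l.map (fun x => ((g x).map f).sum)).sum := by
  induction l with
  | nil => simp
  | cons x l ih => simp [List.flatMap_cons, ih]

lemma pv_sum_map_neg (l : List Int) : (l.map (fun x => -x)).sum = -l.sum := by
  induction l with
  | nil => simp
  | cons y ys ih => simp only [List.map_cons, List.sum_cons, ih]; ring

-- list of same-signed integers: the sum of absolute values is the absolute value of the sum
lemma pv_abs_sum (l : List Int) (h : (∀ x ∈ l, 0 ≤ x) ∨ (∀ x ∈ l, x ≤ 0)) :
    (l.map (fun x => |x|)).sum = |l.sum| := by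
  induction l with
  | nil => simp
  | cons x l ih =>
    rcases h with h | h
    · have hs : 0 ≤ l.sum := List.sum_nonneg (fun y hy => h y (by simp [hy]))
      have hx : 0 ≤ x := h x (by simp)
      rw [List.map_cons, List.sum_cons, List.sum_cons,
        ih (Or.inl (fun y hy => h y (by simp [hy]))),
        abs_of_nonneg hx, abs_of_nonneg hs, abs_of_nonneg (by omega)]
    · have hs : l.sum ≤ 0 := by
        have h0 : 0 ≤ (l.map (fun x => -x)).sum := List.sum_nonneg (fun y hy => by
          rcases List.mem_map.mp hy with ⟨z, hz, rfl⟩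
          have := h z (by simp [hz]); omega)
        have h1 : (l.map (fun x => -x)).sum = -l.sum := pv_sum_map_neg l
        omega
      have hx : x ≤ 0 := h x (by simp)
      rw [List.map_cons, List.sum_cons, List.sum_cons,
        ih (Or.inr (fun y hy => h y (by simp [hy]))),
        abs_of_nonpos hx, abs_of_nonpos hs, abs_of_nonpos (by omega)]
      ring

-- swap a list sum with a Finset sum
lemma pv_swap_sum {α : Type} (l : List α) (s : Finset Int) (f : α → Int → Int) :
    (l.map (fun p => ∑ t ∈ s, f p t)).sum = ∑ t ∈ s, (l.map (fun p => f p t)).sum := by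
  induction l with
  | nil => simp
  | cons x l ih => simp [ih, Finset.sum_add_distrib]

-- per-pair interval identity: |x - y| counts the integers between x and y
lemma pv_chi_interval (x y lo hi : Int) (hx : lo ≤ x) (hx' : x ≤ hi) (hy : lo ≤ y) (hy' : y ≤ hi) :
    ∑ t ∈ Finset.Ico lo hi, |pvChi x t - pvChi y t| = |x - y| := by
  have key : ∀ x y : Int, lo ≤ x → x ≤ y → y ≤ hi →
      ∑ t ∈ Finset.Ico lo hi, |pvChi x t - pvChi y t| = y - x := by
    intro x y h1 h2 h3
    have hpt : ∀ t ∈ Finset.Ico lo hi, |pvChi x t - pvChi y t|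
        = if t ∈ Finset.Ico x y then (1 : Int) else 0 := by
      intro t _
      simp only [pvChi, Finset.mem_Ico]
      split_ifs <;> simp <;> omega
    rw [Finset.sum_congr rfl hpt, Finset.sum_ite_mem,
      Finset.inter_eq_right.mpr (Finset.Ico_subset_Ico h1 h3), Finset.sum_const,
      Int.card_Ico, nsmul_eq_mul, mul_one, Int.toNat_of_nonneg (by omega)]
  rcases le_total x y with hxy | hxy
  · rw [key x y hx hxy hy', abs_of_nonpos (by omega)]; ring
  · have hcomm : ∀ t ∈ Finset.Ico lo hi, |pvChi x t - pvChi y t| = |pvChi y t - pvChi x t| := by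
      intro t _; rw [abs_sub_comm]
    rw [Finset.sum_congr rfl hcomm, key y x hy hxy hx', abs_of_nonneg (by omega)]

-- sign alignment: for componentwise-ordered pairs the indicator differences never mix signs
lemma pv_aligned (P : List (Int × Int)) (t : Int)
    (hp : P.Pairwise (fun p q => p.1 ≤ q.1 ∧ p.2 ≤ q.2)) :
    (∀ p ∈ P, 0 ≤ pvChi p.1 t - pvChi p.2 t) ∨ (∀ p ∈ P, pvChi p.1 t - pvChi p.2 t ≤ 0) := by
  induction P with
  | nil => left; intro p hp; simp at hp
  | cons p P ih =>
    rcases List.pairwise_cons.mp hp with ⟨hrel, hP⟩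
    rcases lt_trichotomy (pvChi p.1 t - pvChi p.2 t) 0 with hneg | hzero | hpos
    · right
      intro q hq
      rcases List.mem_cons.mp hq with rfl | hq
      · omega
      · have h1 : t < p.1 ∧ p.2 ≤ t := by
          simp only [pvChi] at hneg; split_ifs at hneg <;> omega
        have h2 := hrel q hq
        simp only [pvChi]; split_ifs <;> omega
    · rcases ih hP with h | h
      · left; intro q hq
        rcases List.mem_cons.mp hq with rfl | hq
        · omega
        · exact h q hq
      · right; intro q hq
        rcases List.mem_cons.mp hq with rfl | hq
        · omega
        · exact h q hq
    · left
      intro q hq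
      rcases List.mem_cons.mp hq with rfl | hq
      · omega
      · have h1 : p.1 ≤ t ∧ t < p.2 := by
          simp only [pvChi] at hpos; split_ifs at hpos <;> omega
        have h2 := hrel q hq
        simp only [pvChi]; split_ifs <;> omega

-- sorted pair sum = integral of |difference of the two CDFs|
lemma pv_pairSum_eq_Ico (P : List (Int × Int)) (lo hi : Int)
    (hp : P.Pairwise (fun p q => p.1 ≤ q.1 ∧ p.2 ≤ q.2))
    (hb : ∀ p ∈ P, lo ≤ p.1 ∧ p.1 ≤ hi ∧ lo ≤ p.2 ∧ p.2 ≤ hi) :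
    (P.map (fun p => |p.1 - p.2|)).sum
      = ∑ t ∈ Finset.Ico lo hi, |(P.map (fun p => pvChi p.1 t - pvChi p.2 t)).sum| := by
  have h1 : P.map (fun p => |p.1 - p.2|)
      = P.map (fun p => ∑ t ∈ Finset.Ico lo hi, |pvChi p.1 t - pvChi p.2 t|) := by
    apply List.map_congr_left
    intro p hpm
    obtain ⟨b1, b2, b3, b4⟩ := hb p hpm
    exact (pv_chi_interval p.1 p.2 lo hi b1 b2 b3 b4).symm
  rw [h1, pv_swap_sum]
  apply Finset.sum_congr rfl
  intro t _
  have h2 : P.map (fun p => |pvChi p.1 t - pvChi p.2 t|)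
      = (P.map (fun p => pvChi p.1 t - pvChi p.2 t)).map (fun x => |x|) := by
    simp [List.map_map, Function.comp_def]
  rw [h2]
  apply pv_abs_sum
  rcases pv_aligned P t hp with h | h
  · left; intro x hx
    rcases List.mem_map.mp hx with ⟨p, hpm, rfl⟩; exact h p hpm
  · right; intro x hx
    rcases List.mem_map.mp hx with ⟨p, hpm, rfl⟩; exact h p hpm

-- zip of two sorted lists is componentwise ordered
lemma pv_zip_pairwise (u v : List Int) (hu : u.Pairwise (· ≤ ·)) (hv : v.Pairwise (· ≤ ·)) :
    (u.zip v).Pairwise (fun p q => p.1 ≤ q.1 ∧ p.2 ≤ q.2) := by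
  rw [List.pairwise_iff_getElem] at hu hv ⊢
  intro i j hi hj hij
  have hlen : (u.zip v).length = min u.length v.length := List.length_zip
  simp only [List.getElem_zip]
  exact ⟨hu i j (by omega) (by omega) hij, hv i j (by omega) (by omega) hij⟩

-- ===== the sweep =====

-- the lexicographic comparator used by sorted2 with fst/snd keys
def pvLex2 (p q : Int × Int) : Bool :=
  decide (p.1 < q.1) || (!decide (q.1 < p.1) && decide (p.2 < q.2))

lemma pv_insertBy_cons2 (b : Int × Int → Int × Int → Bool) (x y : Int × Int) (ys : List (Int × Int)) :
    PySem.List.insertBy b x (y :: ys) = if b x y then x :: y :: ys else y :: PySem.List.insertBy b x ys := rfl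

lemma pv_insertBy_pairwise_fst (x : Int × Int) (L : List (Int × Int))
    (h : L.Pairwise (fun p q => p.1 ≤ q.1)) :
    (PySem.List.insertBy pvLex2 x L).Pairwise (fun p q => p.1 ≤ q.1) := by
  induction L with
  | nil => simp [PySem.List.insertBy]
  | cons y L ih =>
    rcases List.pairwise_cons.mp h with ⟨hy, hL⟩
    rw [pv_insertBy_cons2]
    by_cases hb : pvLex2 x y = true
    · rw [if_pos hb]
      have hxy : x.1 ≤ y.1 := by
        simp only [pvLex2, Bool.or_eq_true, Bool.and_eq_true, Bool.not_eq_true',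
          decide_eq_true_eq, decide_eq_false_iff_not] at hb
        rcases hb with h1 | ⟨h1, _⟩ <;> omega
      exact List.pairwise_cons.mpr ⟨fun q hq => by
        rcases List.mem_cons.mp hq with rfl | hq
        · exact hxy
        · exact le_trans hxy (hy q hq), h⟩
    · rw [if_neg hb]
      have hyx : y.1 ≤ x.1 := by
        simp only [pvLex2, Bool.or_eq_true, Bool.and_eq_true, Bool.not_eq_true',
          decide_eq_true_eq, decide_eq_false_iff_not] at hb
        omega
      refine List.pairwise_cons.mpr ⟨fun q hq => ?_, ih hL⟩
      rcases (PySem.List.mem_insertBy _ _ _ _).mp hq with rfl | hq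
      · exact hyx
      · exact hy q hq

lemma pv_sorted2_pairwise_fst (E : List (Int × Int)) :
    (PySem.List.sorted2 E (fun p => p.1) (fun p => p.2) false).Pairwise (fun p q => p.1 ≤ q.1) := by
  have hdef : PySem.List.sorted2 E (fun p => p.1) (fun p => p.2) false
      = E.foldl (fun acc x => PySem.List.insertBy pvLex2 x acc) [] := rfl
  rw [hdef]
  have : ∀ (l : List (Int × Int)) (acc : List (Int × Int)),
      acc.Pairwise (fun p q => p.1 ≤ q.1) →
      (l.foldl (fun acc x => PySem.List.insertBy pvLex2 x acc) acc).Pairwise (fun p q => p.1 ≤ q.1) := by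
    intro l
    induction l with
    | nil => intro acc h; exact h
    | cons x l ih => intro acc h; exact ih _ (pv_insertBy_pairwise_fst x acc h)
  exact this E [] (by simp)

-- split an Ico sum at a midpoint
lemma pv_Ico_split (f : Int → Int) (a b c : Int) (h1 : a ≤ b) (h2 : b ≤ c) :
    ∑ t ∈ Finset.Ico a c, f t = (∑ t ∈ Finset.Ico a b, f t) + ∑ t ∈ Finset.Ico b c, f t := by
  rw [← Finset.Ico_union_Ico_eq_Ico h1 h2,
    Finset.sum_union (Finset.Ico_disjoint_Ico_consecutive a b c)]

-- the CDF of an event list is zero left of all its values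
lemma pv_F_zero_of_lt (L : List (Int × Int)) (t : Int) (h : ∀ p ∈ L, t < p.1) :
    pvF L t = 0 := by
  unfold pvF
  have : L.map (fun p => if p.1 ≤ t then p.2 else 0) = L.map (fun _ => (0 : Int)) := by
    apply List.map_congr_left
    intro p hp
    rw [if_neg (by have := h p hp; omega)]
  rw [this]; simp

-- sweep invariant: from state (total, bal, prev) over a value-sorted suffix whose final balance is 0
lemma pv_sweep_inv (hi : Int) (L : List (Int × Int))
    (hs : L.Pairwise (fun p q => p.1 ≤ q.1)) :
    ∀ (total bal prev : Int), (∀ p ∈ L, prev ≤ p.1 ∧ p.1 ≤ hi) →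
    bal + (L.map (fun p => p.2)).sum = 0 →
    (L.foldl pvSweepStep (total, bal, prev)).1
      = total + ∑ t ∈ Finset.Ico prev hi, |bal + pvF L t| := by
  induction L with
  | nil =>
    intro total bal prev _ hb
    simp only [List.map_nil, List.sum_nil, add_zero] at hb
    simp [pvF, hb]
  | cons p L ih =>
    intro total bal prev hm hb
    obtain ⟨hp1, hp2⟩ := hm p (by simp)
    rcases List.pairwise_cons.mp hs with ⟨hhead, htail⟩
    have step : pvSweepStep (total, bal, prev) p = (total + |bal| * (p.1 - prev), bal + p.2, p.1) := rfl
    rw [List.foldl_cons, step,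
      ih htail (total + |bal| * (p.1 - prev)) (bal + p.2) p.1
        (fun q hq => ⟨hhead q hq, (hm q (by simp [hq])).2⟩)
        (by simp only [List.map_cons, List.sum_cons] at hb ⊢; omega)]
    rw [pv_Ico_split (fun t => |bal + pvF (p :: L) t|) prev p.1 hi hp1 hp2]
    have hleft : ∑ t ∈ Finset.Ico prev p.1, |bal + pvF (p :: L) t| = |bal| * (p.1 - prev) := by
      have hc : ∀ t ∈ Finset.Ico prev p.1, |bal + pvF (p :: L) t| = |bal| := by
        intro t ht
        rcases Finset.mem_Ico.mp ht with ⟨_, ht2⟩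
        have hF : pvF (p :: L) t = 0 := by
          rw [pv_F_zero_of_lt]
          intro q hq
          rcases List.mem_cons.mp hq with rfl | hq
          · omega
          · have := hhead q hq; omega
        rw [hF, add_zero]
      rw [Finset.sum_congr rfl hc, Finset.sum_const, Int.card_Ico, nsmul_eq_mul,
        Int.toNat_of_nonneg (by omega)]
      ring
    have hright : ∑ t ∈ Finset.Ico p.1 hi, |bal + pvF (p :: L) t|
        = ∑ t ∈ Finset.Ico p.1 hi, |bal + p.2 + pvF L t| := by
      apply Finset.sum_congr rfl
      intro t ht
      rcases Finset.mem_Ico.mp ht with ⟨ht1, _⟩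
      have : pvF (p :: L) t = p.2 + pvF L t := by
        unfold pvF; simp [ht1]
      rw [this]; ring_nf
    rw [hleft, hright]; ring

-- the whole sweep from (total, 0, 0) over a value-sorted event list of total balance 0
lemma pv_sweep_eq_Ico (E : List (Int × Int)) (lo hi total : Int)
    (hs : E.Pairwise (fun p q => p.1 ≤ q.1))
    (hm : ∀ p ∈ E, lo ≤ p.1 ∧ p.1 ≤ hi)
    (h0 : (E.map (fun p => p.2)).sum = 0) :
    (E.foldl pvSweepStep (total, 0, 0)).1 = total + ∑ t ∈ Finset.Ico lo hi, |pvF E t| := by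
  cases E with
  | nil => simp [pvF]
  | cons p L =>
    obtain ⟨hp1, hp2⟩ := hm p (by simp)
    rcases List.pairwise_cons.mp hs with ⟨hhead, htail⟩
    have step : pvSweepStep (total, 0, 0) p = (total, p.2, p.1) := by
      simp [pvSweepStep]
    rw [List.foldl_cons, step,
      pv_sweep_inv hi L htail total p.2 p.1
        (fun q hq => ⟨hhead q hq, (hm q (by simp [hq])).2⟩)
        (by simp only [List.map_cons, List.sum_cons] at h0; omega)]
    rw [pv_Ico_split (fun t => |pvF (p :: L) t|) lo p.1 hi hp1 hp2]
    have hleft : ∑ t ∈ Finset.Ico lo p.1, |pvF (p :: L) t| = 0 := by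
      apply Finset.sum_eq_zero
      intro t ht
      rcases Finset.mem_Ico.mp ht with ⟨_, ht2⟩
      rw [pv_F_zero_of_lt]
      · simp
      · intro q hq
        rcases List.mem_cons.mp hq with rfl | hq
        · omega
        · have := hhead q hq; omega
    have hright : ∑ t ∈ Finset.Ico p.1 hi, |pvF (p :: L) t|
        = ∑ t ∈ Finset.Ico p.1 hi, |p.2 + pvF L t| := by
      apply Finset.sum_congr rfl
      intro t ht
      rcases Finset.mem_Ico.mp ht with ⟨ht1, _⟩
      have : pvF (p :: L) t = p.2 + pvF L t := by
        unfold pvF; simp [ht1]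
      rw [this]
    rw [hleft, hright]; ring

-- ===== the per-parity-class bridge: sweep of sorted events = sorted pair sum =====
lemma pv_class (E : List (Int × Int)) (u v : List Int) (lo hi total : Int)
    (hF : ∀ t, pvF E t = (u.map (fun x => pvChi x t)).sum - (v.map (fun y => pvChi y t)).sum)
    (hsnd : (E.map (fun p => p.2)).sum = 0)
    (hmem : ∀ p ∈ E, lo ≤ p.1 ∧ p.1 ≤ hi)
    (hu : ∀ x ∈ u, lo ≤ x ∧ x ≤ hi) (hv : ∀ y ∈ v, lo ≤ y ∧ y ≤ hi)
    (hlen : u.length = v.length) :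
    ((PySem.List.sorted2 E (fun p => p.1) (fun p => p.2) false).foldl pvSweepStep (total, 0, 0)).1
      = total + (((PySem.List.sorted u (fun x => x) false).zip
          (PySem.List.sorted v (fun x => x) false)).map (fun p => |p.1 - p.2|)).sum := by
  set L := PySem.List.sorted2 E (fun p => p.1) (fun p => p.2) false with hL
  have hperm : L.Perm E := PySem.List.sorted2_perm E _ _ _
  have hLF : ∀ t, pvF L t = pvF E t := fun t => (hperm.map _).sum_eq
  have hLsnd : (L.map (fun p => p.2)).sum = 0 := ((hperm.map _).sum_eq).trans hsnd
  have hLm : ∀ p ∈ L, lo ≤ p.1 ∧ p.1 ≤ hi := fun p hp => hmem p (hperm.subset hp)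
  rw [pv_sweep_eq_Ico L lo hi total (pv_sorted2_pairwise_fst E) hLm hLsnd]
  congr 1
  set su := PySem.List.sorted u (fun x => x) false with hsu
  set sv := PySem.List.sorted v (fun x => x) false with hsv
  have hsulen : su.length = sv.length := by
    rw [hsu, hsv, PySem.List.length_sorted, PySem.List.length_sorted, hlen]
  set P := su.zip sv with hP
  have hPfst : P.map Prod.fst = su := List.map_fst_zip (by omega : su.length ≤ sv.length)
  have hPsnd : P.map Prod.snd = sv := List.map_snd_zip (by omega : sv.length ≤ su.length)
  have hPp : P.Pairwise (fun p q => p.1 ≤ q.1 ∧ p.2 ≤ q.2) := by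
    apply pv_zip_pairwise
    · have := PySem.List.sorted_pairwise u (fun x => x)
      simpa using this
    · have := PySem.List.sorted_pairwise v (fun x => x)
      simpa using this
  have hPb : ∀ p ∈ P, lo ≤ p.1 ∧ p.1 ≤ hi ∧ lo ≤ p.2 ∧ p.2 ≤ hi := by
    intro p hpm
    obtain ⟨h1, h2⟩ := List.of_mem_zip hpm
    have hu' := hu p.1 ((PySem.List.mem_sorted _ _ _ _).mp h1)
    have hv' := hv p.2 ((PySem.List.mem_sorted _ _ _ _).mp h2)
    exact ⟨hu'.1, hu'.2, hv'.1, hv'.2⟩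
  rw [pv_pairSum_eq_Ico P lo hi hPp hPb]
  apply Finset.sum_congr rfl
  intro t _
  rw [hLF, hF, pv_sum_map_sub]
  congr 2
  · have : P.map (fun p => pvChi p.1 t) = (P.map Prod.fst).map (fun x => pvChi x t) := by
      simp [List.map_map, Function.comp_def]
    rw [this, hPfst, hsu]
    exact ((PySem.List.sorted_perm u (fun x => x) false).map _).sum_eq.symm
  · have : P.map (fun p => pvChi p.2 t) = (P.map Prod.snd).map (fun y => pvChi y t) := by
      simp [List.map_map, Function.comp_def]
    rw [this, hPsnd, hsv]
    exact ((PySem.List.sorted_perm v (fun x => x) false).map _).sum_eq.symm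

-- 2 ∣ each pair difference ⇒ doubling the half-sums gives the plain sum
lemma pv_double_half (P : List (Int × Int)) (h : ∀ p ∈ P, (p.1 - p.2) % 2 = 0) :
    2 * (P.map (fun p => PySem.Int.floordiv |p.1 - p.2| 2)).sum
      = (P.map (fun p => |p.1 - p.2|)).sum := by
  induction P with
  | nil => simp
  | cons p P ih =>
    simp only [List.map_cons, List.sum_cons, mul_add]
    rw [ih (fun q hq => h q (by simp [hq]))]
    have hd := h p (by simp)
    rw [PySem.Int.floordiv_eq_ediv_of_pos (by omega)]
    have habs : |p.1 - p.2| % 2 = 0 := by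
      rcases abs_cases (p.1 - p.2) with ⟨he, _⟩ | ⟨he, _⟩ <;> rw [he] <;> omega
    omega

-- the B-side event-building steps append pvG0 / pvG1
lemma pv_step0 (l : List (Int × Int)) (p : Int × Int) :
    (if PySem.Int.mod p.2 2 == 0
      then (if PySem.Int.mod p.1 2 == 0 then l ++ [(p.1, (1 : Int))] else l) ++ [(p.2, (-1 : Int))]
      else (if PySem.Int.mod p.1 2 == 0 then l ++ [(p.1, (1 : Int))] else l))
    = l ++ pvG0 p := by
  unfold pvG0
  by_cases h1 : (2 : Int) ∣ p.1 <;> by_cases h2 : (2 : Int) ∣ p.2 <;> simp [h1, h2]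

lemma pv_step1 (l : List (Int × Int)) (p : Int × Int) :
    (if PySem.Int.mod p.2 2 == 0
      then (if PySem.Int.mod p.1 2 == 0 then l else l ++ [(p.1, (1 : Int))])
      else (if PySem.Int.mod p.1 2 == 0 then l else l ++ [(p.1, (1 : Int))]) ++ [(p.2, (-1 : Int))])
    = l ++ pvG1 p := by
  unfold pvG1
  by_cases h1 : (2 : Int) ∣ p.1 <;> by_cases h2 : (2 : Int) ∣ p.2 <;> simp [h1, h2]

-- signed-delta sum of the class-0 event list = difference of the even counts
lemma pv_snd_flat0 (Z : List (Int × Int)) :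
    ((Z.flatMap pvG0).map (fun p => p.2)).sum
      = (((Z.map Prod.fst).filter (fun x => PySem.Int.mod x 2 == 0)).length : Int)
        - (((Z.map Prod.snd).filter (fun x => PySem.Int.mod x 2 == 0)).length : Int) := by
  rw [pv_sum_map_flatMap]
  have h1 : Z.map (fun p => ((pvG0 p).map (fun q => q.2)).sum)
      = Z.map (fun p => (if PySem.Int.mod p.1 2 == 0 then (1 : Int) else 0)
          - (if PySem.Int.mod p.2 2 == 0 then (1 : Int) else 0)) := by
    apply List.map_congr_left
    intro p _
    by_cases e1 : (2 : Int) ∣ p.1 <;> by_cases e2 : (2 : Int) ∣ p.2 <;> simp [pvG0, e1, e2]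
  rw [h1, pv_sum_map_sub]
  congr 1
  · rw [show (fun p : Int × Int => if PySem.Int.mod p.1 2 == 0 then (1 : Int) else 0)
        = (fun x : Int => if PySem.Int.mod x 2 == 0 then (1 : Int) else 0) ∘ Prod.fst from rfl,
      ← List.map_map, pv_sum_map_if]
    simp
  · rw [show (fun p : Int × Int => if PySem.Int.mod p.2 2 == 0 then (1 : Int) else 0)
        = (fun x : Int => if PySem.Int.mod x 2 == 0 then (1 : Int) else 0) ∘ Prod.snd from rfl,
      ← List.map_map, pv_sum_map_if]
    simp

-- CDF of the class-0 / class-1 event lists in terms of the parity filters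
lemma pv_F_flat0 (Z : List (Int × Int)) (t : Int) :
    pvF (Z.flatMap pvG0) t
      = (((Z.map Prod.fst).filter (fun x => PySem.Int.mod x 2 == 0)).map (fun x => pvChi x t)).sum
        - (((Z.map Prod.snd).filter (fun x => PySem.Int.mod x 2 == 0)).map (fun y => pvChi y t)).sum := by
  unfold pvF
  rw [pv_sum_map_flatMap]
  have h1 : Z.map (fun p => ((pvG0 p).map (fun q => if q.1 ≤ t then q.2 else 0)).sum)
      = Z.map (fun p => (if PySem.Int.mod p.1 2 == 0 then pvChi p.1 t else 0)
          - (if PySem.Int.mod p.2 2 == 0 then pvChi p.2 t else 0)) := by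
    apply List.map_congr_left
    intro p _
    by_cases e1 : (2 : Int) ∣ p.1 <;> by_cases e2 : (2 : Int) ∣ p.2 <;>
      by_cases t1 : p.1 ≤ t <;> by_cases t2 : p.2 ≤ t <;>
      simp [pvG0, pvChi, e1, e2, t1, t2]
  rw [h1, pv_sum_map_sub]
  congr 1
  · rw [show (fun p : Int × Int => if PySem.Int.mod p.1 2 == 0 then pvChi p.1 t else 0)
        = (fun x : Int => if PySem.Int.mod x 2 == 0 then pvChi x t else 0) ∘ Prod.fst from rfl,
      ← List.map_map, pv_sum_map_if]
  · rw [show (fun p : Int × Int => if PySem.Int.mod p.2 2 == 0 then pvChi p.2 t else 0)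
        = (fun x : Int => if PySem.Int.mod x 2 == 0 then pvChi x t else 0) ∘ Prod.snd from rfl,
      ← List.map_map, pv_sum_map_if]

lemma pv_snd_flat1 (Z : List (Int × Int)) :
    ((Z.flatMap pvG1).map (fun p => p.2)).sum
      = (((Z.map Prod.fst).filter (fun x => !(PySem.Int.mod x 2 == 0))).length : Int)
        - (((Z.map Prod.snd).filter (fun x => !(PySem.Int.mod x 2 == 0))).length : Int) := by
  rw [pv_sum_map_flatMap]
  have h1 : Z.map (fun p => ((pvG1 p).map (fun q => q.2)).sum)
      = Z.map (fun p => (if !(PySem.Int.mod p.1 2 == 0) then (1 : Int) else 0)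
          - (if !(PySem.Int.mod p.2 2 == 0) then (1 : Int) else 0)) := by
    apply List.map_congr_left
    intro p _
    by_cases e1 : (2 : Int) ∣ p.1 <;> by_cases e2 : (2 : Int) ∣ p.2 <;> simp [pvG1, e1, e2]
  rw [h1, pv_sum_map_sub]
  congr 1
  · rw [show (fun p : Int × Int => if !(PySem.Int.mod p.1 2 == 0) then (1 : Int) else 0)
        = (fun x : Int => if !(PySem.Int.mod x 2 == 0) then (1 : Int) else 0) ∘ Prod.fst from rfl,
      ← List.map_map, pv_sum_map_if]
    simp
  · rw [show (fun p : Int × Int => if !(PySem.Int.mod p.2 2 == 0) then (1 : Int) else 0)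
        = (fun x : Int => if !(PySem.Int.mod x 2 == 0) then (1 : Int) else 0) ∘ Prod.snd from rfl,
      ← List.map_map, pv_sum_map_if]
    simp

lemma pv_F_flat1 (Z : List (Int × Int)) (t : Int) :
    pvF (Z.flatMap pvG1) t
      = (((Z.map Prod.fst).filter (fun x => !(PySem.Int.mod x 2 == 0))).map (fun x => pvChi x t)).sum
        - (((Z.map Prod.snd).filter (fun x => !(PySem.Int.mod x 2 == 0))).map (fun y => pvChi y t)).sum := by
  unfold pvF
  rw [pv_sum_map_flatMap]
  have h1 : Z.map (fun p => ((pvG1 p).map (fun q => if q.1 ≤ t then q.2 else 0)).sum)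
      = Z.map (fun p => (if !(PySem.Int.mod p.1 2 == 0) then pvChi p.1 t else 0)
          - (if !(PySem.Int.mod p.2 2 == 0) then pvChi p.2 t else 0)) := by
    apply List.map_congr_left
    intro p _
    by_cases e1 : (2 : Int) ∣ p.1 <;> by_cases e2 : (2 : Int) ∣ p.2 <;>
      simp [pvG1, pvChi, e1, e2] <;> split_ifs <;> ring
  rw [h1, pv_sum_map_sub]
  congr 1
  · rw [show (fun p : Int × Int => if !(PySem.Int.mod p.1 2 == 0) then pvChi p.1 t else 0)
        = (fun x : Int => if !(PySem.Int.mod x 2 == 0) then pvChi x t else 0) ∘ Prod.fst from rfl,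
      ← List.map_map, pv_sum_map_if]
  · rw [show (fun p : Int × Int => if !(PySem.Int.mod p.2 2 == 0) then pvChi p.2 t else 0)
        = (fun x : Int => if !(PySem.Int.mod x 2 == 0) then pvChi x t else 0) ∘ Prod.snd from rfl,
      ← List.map_map, pv_sum_map_if]

-- every event value of either class comes from one of the zipped components
lemma pv_mem_flat0 (Z : List (Int × Int)) (q : Int × Int) (h : q ∈ Z.flatMap pvG0) :
    ∃ p ∈ Z, q.1 = p.1 ∨ q.1 = p.2 := by
  rcases List.mem_flatMap.mp h with ⟨p, hpZ, hq⟩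
  refine ⟨p, hpZ, ?_⟩
  unfold pvG0 at hq
  rcases List.mem_append.mp hq with h' | h' <;> split_ifs at h' <;> simp_all

lemma pv_mem_flat1 (Z : List (Int × Int)) (q : Int × Int) (h : q ∈ Z.flatMap pvG1) :
    ∃ p ∈ Z, q.1 = p.1 ∨ q.1 = p.2 := by
  rcases List.mem_flatMap.mp h with ⟨p, hpZ, hq⟩
  refine ⟨p, hpZ, ?_⟩
  unfold pvG1 at hq
  rcases List.mem_append.mp hq with h' | h' <;> split_ifs at h' <;> simp_all

-- ===== VERDICT (by name: the statement is the Claim_ definition above) =====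
theorem solve_spec : Claim_equal_solve := by
  intro N A B hdom hpre
  obtain ⟨hA, hB⟩ := hpre
  have hbndA : ∀ x ∈ A, -2147483648 ≤ x ∧ x ≤ 2147483648 := by
    intro x hx
    unfold Dom_solve at hdom
    simp only [Bool.and_eq_true, List.all_eq_true, pvDomInt, decide_eq_true_eq] at hdom
    exact hdom.1.2 x hx
  have hbndB : ∀ x ∈ B, -2147483648 ≤ x ∧ x ≤ 2147483648 := by
    intro x hx
    unfold Dom_solve at hdom
    simp only [Bool.and_eq_true, List.all_eq_true, pvDomInt, decide_eq_true_eq] at hdom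
    exact hdom.2 x hx
  unfold Spec_solve solve solve_alt
  set a := A.take N.toNat with ha
  set b := B.take N.toNat with hb
  have hla : a.length = N.toNat := by rw [ha]; simp; omega
  have hlb : b.length = a.length := by rw [ha, hb]; simp; omega
  set Z := a.zip b with hZ
  have hfst : Z.map Prod.fst = a := List.map_fst_zip (by omega : a.length ≤ b.length)
  have hsnd : Z.map Prod.snd = b := List.map_snd_zip (by omega : b.length ≤ a.length)
  have hbnda : ∀ x ∈ a, -2147483648 ≤ x ∧ x ≤ 2147483648 :=
    fun x hx => hbndA x (List.take_subset _ _ hx)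
  have hbndb : ∀ x ∈ b, -2147483648 ≤ x ∧ x ≤ 2147483648 :=
    fun x hx => hbndB x (List.take_subset _ _ hx)
  -- ===== normalise A's state =====
  have hstA : (PySem.List.pyRange 0 N 1).foldl (fun s i =>
      (s.1 + (PySem.List.pyGetD A i 0 - PySem.List.pyGetD B i 0),
       PySem.Dict.modify s.2.1 (PySem.Int.mod |PySem.List.pyGetD A i 0| 2) [] (fun l => l ++ [PySem.List.pyGetD A i 0]),
       PySem.Dict.modify s.2.2 (PySem.Int.mod |PySem.List.pyGetD B i 0| 2) [] (fun l => l ++ [PySem.List.pyGetD B i 0])))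
      ((0 : Int), (PySem.Dict.empty : PySem.Dict Int (List Int)), (PySem.Dict.empty : PySem.Dict Int (List Int)))
      = Z.foldl (fun s p =>
      (s.1 + (p.1 - p.2),
       PySem.Dict.modify s.2.1 (PySem.Int.mod |p.1| 2) [] (fun l => l ++ [p.1]),
       PySem.Dict.modify s.2.2 (PySem.Int.mod |p.2| 2) [] (fun l => l ++ [p.2])))
      ((0 : Int), (PySem.Dict.empty : PySem.Dict Int (List Int)), (PySem.Dict.empty : PySem.Dict Int (List Int))) :=
    pv_foldl_idx_zip A B N hA hB
      (fun s x y => (s.1 + (x - y),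
        PySem.Dict.modify s.2.1 (PySem.Int.mod |x| 2) [] (fun l => l ++ [x]),
        PySem.Dict.modify s.2.2 (PySem.Int.mod |y| 2) [] (fun l => l ++ [y]))) _
  rw [hstA]
  rw [PySem.List.foldl_prod_mk
    (f := fun (s1 : Int) (p : Int × Int) => s1 + (p.1 - p.2))
    (g := fun (s2 : PySem.Dict Int (List Int) × PySem.Dict Int (List Int)) (p : Int × Int) =>
      (PySem.Dict.modify s2.1 (PySem.Int.mod |p.1| 2) [] (fun l => l ++ [p.1]),
       PySem.Dict.modify s2.2 (PySem.Int.mod |p.2| 2) [] (fun l => l ++ [p.2])))]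
  rw [PySem.List.foldl_prod_mk
    (f := fun (d : PySem.Dict Int (List Int)) (p : Int × Int) =>
      PySem.Dict.modify d (PySem.Int.mod |p.1| 2) [] (fun l => l ++ [p.1]))
    (g := fun (d : PySem.Dict Int (List Int)) (p : Int × Int) =>
      PySem.Dict.modify d (PySem.Int.mod |p.2| 2) [] (fun l => l ++ [p.2]))]
  have hdictA : Z.foldl (fun d p =>
        PySem.Dict.modify d (PySem.Int.mod |p.1| 2) [] (fun l => l ++ [p.1])) PySem.Dict.empty
      = a.foldl (fun d x =>
        PySem.Dict.modify d (PySem.Int.mod |x| 2) [] (fun l => l ++ [x])) PySem.Dict.empty := by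
    rw [← hfst, List.foldl_map]
  have hdictB : Z.foldl (fun d p =>
        PySem.Dict.modify d (PySem.Int.mod |p.2| 2) [] (fun l => l ++ [p.2])) PySem.Dict.empty
      = b.foldl (fun d x =>
        PySem.Dict.modify d (PySem.Int.mod |x| 2) [] (fun l => l ++ [x])) PySem.Dict.empty := by
    rw [← hsnd, List.foldl_map]
  have hsum : Z.foldl (fun (s1 : Int) (p : Int × Int) => s1 + (p.1 - p.2)) 0
      = a.sum - b.sum := by
    rw [PySem.List.foldl_add Z (fun p => p.1 - p.2) 0, hZ, pv_sum_zip_sub a b hlb]; ring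
  rw [hdictA, hdictB, hsum]
  simp only [pv_getD_group]
  -- ===== normalise B's state =====
  have hstB : (PySem.List.pyRange 0 N 1).foldl (fun s i =>
      (s.1 + (PySem.List.pyGetD A i 0 - PySem.List.pyGetD B i 0),
       (if PySem.Int.mod (PySem.List.pyGetD B i 0) 2 == 0
          then (if PySem.Int.mod (PySem.List.pyGetD A i 0) 2 == 0
                then s.2.1 ++ [(PySem.List.pyGetD A i 0, (1 : Int))] else s.2.1)
               ++ [(PySem.List.pyGetD B i 0, (-1 : Int))]
          else (if PySem.Int.mod (PySem.List.pyGetD A i 0) 2 == 0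
                then s.2.1 ++ [(PySem.List.pyGetD A i 0, (1 : Int))] else s.2.1)),
       (if PySem.Int.mod (PySem.List.pyGetD B i 0) 2 == 0
          then (if PySem.Int.mod (PySem.List.pyGetD A i 0) 2 == 0
                then s.2.2 else s.2.2 ++ [(PySem.List.pyGetD A i 0, (1 : Int))])
          else (if PySem.Int.mod (PySem.List.pyGetD A i 0) 2 == 0
                then s.2.2 else s.2.2 ++ [(PySem.List.pyGetD A i 0, (1 : Int))])
               ++ [(PySem.List.pyGetD B i 0, (-1 : Int))])))
      ((0 : Int), ([] : List (Int × Int)), ([] : List (Int × Int)))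
      = Z.foldl (fun s p =>
      (s.1 + (p.1 - p.2),
       (if PySem.Int.mod p.2 2 == 0
          then (if PySem.Int.mod p.1 2 == 0 then s.2.1 ++ [(p.1, (1 : Int))] else s.2.1)
               ++ [(p.2, (-1 : Int))]
          else (if PySem.Int.mod p.1 2 == 0 then s.2.1 ++ [(p.1, (1 : Int))] else s.2.1)),
       (if PySem.Int.mod p.2 2 == 0
          then (if PySem.Int.mod p.1 2 == 0 then s.2.2 else s.2.2 ++ [(p.1, (1 : Int))])
          else (if PySem.Int.mod p.1 2 == 0 then s.2.2 else s.2.2 ++ [(p.1, (1 : Int))])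
               ++ [(p.2, (-1 : Int))])))
      ((0 : Int), ([] : List (Int × Int)), ([] : List (Int × Int))) :=
    pv_foldl_idx_zip A B N hA hB
      (fun s x y => (s.1 + (x - y),
       (if PySem.Int.mod y 2 == 0
          then (if PySem.Int.mod x 2 == 0 then s.2.1 ++ [(x, (1 : Int))] else s.2.1)
               ++ [(y, (-1 : Int))]
          else (if PySem.Int.mod x 2 == 0 then s.2.1 ++ [(x, (1 : Int))] else s.2.1)),
       (if PySem.Int.mod y 2 == 0
          then (if PySem.Int.mod x 2 == 0 then s.2.2 else s.2.2 ++ [(x, (1 : Int))])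
          else (if PySem.Int.mod x 2 == 0 then s.2.2 else s.2.2 ++ [(x, (1 : Int))])
               ++ [(y, (-1 : Int))]))) _
  rw [hstB]
  rw [PySem.List.foldl_prod_mk
    (f := fun (s1 : Int) (p : Int × Int) => s1 + (p.1 - p.2))
    (g := fun (s2 : List (Int × Int) × List (Int × Int)) (p : Int × Int) =>
      ((if PySem.Int.mod p.2 2 == 0
          then (if PySem.Int.mod p.1 2 == 0 then s2.1 ++ [(p.1, (1 : Int))] else s2.1)
               ++ [(p.2, (-1 : Int))]
          else (if PySem.Int.mod p.1 2 == 0 then s2.1 ++ [(p.1, (1 : Int))] else s2.1)),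
       (if PySem.Int.mod p.2 2 == 0
          then (if PySem.Int.mod p.1 2 == 0 then s2.2 else s2.2 ++ [(p.1, (1 : Int))])
          else (if PySem.Int.mod p.1 2 == 0 then s2.2 else s2.2 ++ [(p.1, (1 : Int))])
               ++ [(p.2, (-1 : Int))])))]
  rw [PySem.List.foldl_prod_mk
    (f := fun (l : List (Int × Int)) (p : Int × Int) =>
      (if PySem.Int.mod p.2 2 == 0
          then (if PySem.Int.mod p.1 2 == 0 then l ++ [(p.1, (1 : Int))] else l)
               ++ [(p.2, (-1 : Int))]
          else (if PySem.Int.mod p.1 2 == 0 then l ++ [(p.1, (1 : Int))] else l)))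
    (g := fun (l : List (Int × Int)) (p : Int × Int) =>
      (if PySem.Int.mod p.2 2 == 0
          then (if PySem.Int.mod p.1 2 == 0 then l else l ++ [(p.1, (1 : Int))])
          else (if PySem.Int.mod p.1 2 == 0 then l else l ++ [(p.1, (1 : Int))])
               ++ [(p.2, (-1 : Int))]))]
  rw [hsum]
  have hev0 : Z.foldl (fun (l : List (Int × Int)) (p : Int × Int) =>
      (if PySem.Int.mod p.2 2 == 0
          then (if PySem.Int.mod p.1 2 == 0 then l ++ [(p.1, (1 : Int))] else l)
               ++ [(p.2, (-1 : Int))]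
          else (if PySem.Int.mod p.1 2 == 0 then l ++ [(p.1, (1 : Int))] else l))) []
      = Z.flatMap pvG0 := by
    rw [show (fun (l : List (Int × Int)) (p : Int × Int) =>
      (if PySem.Int.mod p.2 2 == 0
          then (if PySem.Int.mod p.1 2 == 0 then l ++ [(p.1, (1 : Int))] else l)
               ++ [(p.2, (-1 : Int))]
          else (if PySem.Int.mod p.1 2 == 0 then l ++ [(p.1, (1 : Int))] else l)))
      = (fun l p => l ++ pvG0 p) from funext fun l => funext fun p => pv_step0 l p]
    rw [PySem.List.foldl_append_eq_flatMap]
    exact List.nil_append _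
  have hev1 : Z.foldl (fun (l : List (Int × Int)) (p : Int × Int) =>
      (if PySem.Int.mod p.2 2 == 0
          then (if PySem.Int.mod p.1 2 == 0 then l else l ++ [(p.1, (1 : Int))])
          else (if PySem.Int.mod p.1 2 == 0 then l else l ++ [(p.1, (1 : Int))])
               ++ [(p.2, (-1 : Int))])) []
      = Z.flatMap pvG1 := by
    rw [show (fun (l : List (Int × Int)) (p : Int × Int) =>
      (if PySem.Int.mod p.2 2 == 0
          then (if PySem.Int.mod p.1 2 == 0 then l else l ++ [(p.1, (1 : Int))])
          else (if PySem.Int.mod p.1 2 == 0 then l else l ++ [(p.1, (1 : Int))])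
               ++ [(p.2, (-1 : Int))]))
      = (fun l p => l ++ pvG1 p) from funext fun l => funext fun p => pv_step1 l p]
    rw [PySem.List.foldl_append_eq_flatMap]
    exact List.nil_append _
  rw [hev0, hev1]
  -- ===== guards =====
  have hsnd0 : ((Z.flatMap pvG0).map (fun p => p.2)).sum
      = ((a.filter (fun x => PySem.Int.mod x 2 == 0)).length : Int)
        - ((b.filter (fun x => PySem.Int.mod x 2 == 0)).length : Int) := by
    rw [pv_snd_flat0, hfst, hsnd]
  have hfo : ∀ l : List Int, l.filter (fun x => PySem.Int.mod x 2 == 1)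
      = l.filter (fun x => !(PySem.Int.mod x 2 == 0)) := fun l =>
    List.filter_congr (fun x _ => by
      have h2 : x % 2 = 0 ∨ x % 2 = 1 := by omega
      rcases h2 with h | h <;> simp [h])
  by_cases hc1 : a.sum = b.sum
  · by_cases hc2 : (a.filter (fun x => PySem.Int.mod x 2 == 0)).length
        = (b.filter (fun x => PySem.Int.mod x 2 == 0)).length
    · rw [if_neg (not_or.mpr ⟨fun h => h (sub_eq_zero.mpr hc1), fun h => h hc2⟩),
        if_neg (not_or.mpr ⟨fun h => h (sub_eq_zero.mpr hc1), fun h => h (by rw [hsnd0, hc2]; ring)⟩)]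
      -- equal odd counts too
      have hc2' : (a.filter (fun x => !(PySem.Int.mod x 2 == 0))).length
          = (b.filter (fun x => !(PySem.Int.mod x 2 == 0))).length := by
        rw [pv_length_filter_not, pv_length_filter_not, hlb, hc2]
      -- ===== A's branch value =====
      have hr2 : PySem.List.pyRange 0 2 1 = [0, 1] := rfl
      rw [hr2]
      simp only [List.foldl_cons, List.foldl_nil]
      rw [pv_inner _ _ hc2.symm, pv_inner _ _ (by rw [hfo, hfo, hc2'])]
      rw [hfo a, hfo b]
      -- ===== B's branch value =====
      have hclass0 := pv_class (Z.flatMap pvG0)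
        (a.filter (fun x => PySem.Int.mod x 2 == 0))
        (b.filter (fun x => PySem.Int.mod x 2 == 0))
        (-2147483648) 2147483649 0
        (fun t => by rw [pv_F_flat0, hfst, hsnd])
        (by rw [hsnd0, hc2]; ring)
        (fun q hq => by
          rcases pv_mem_flat0 Z q hq with ⟨p, hpZ, hcase⟩
          obtain ⟨h1, h2⟩ := List.of_mem_zip hpZ
          rcases hcase with h | h <;> rw [h]
          · have := hbnda p.1 h1; omega
          · have := hbndb p.2 h2; omega)
        (fun x hx => by have := hbnda x (List.mem_of_mem_filter hx); omega)
        (fun y hy => by have := hbndb y (List.mem_of_mem_filter hy); omega)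
        hc2
      have hclass1 := pv_class (Z.flatMap pvG1)
        (a.filter (fun x => !(PySem.Int.mod x 2 == 0)))
        (b.filter (fun x => !(PySem.Int.mod x 2 == 0)))
        (-2147483648) 2147483649
        (((PySem.List.sorted2 (Z.flatMap pvG0) (fun p => p.1) (fun p => p.2) false).foldl
          pvSweepStep (0, 0, 0)).1)
        (fun t => by rw [pv_F_flat1, hfst, hsnd])
        (by rw [pv_snd_flat1, hfst, hsnd, hc2']; ring)
        (fun q hq => by
          rcases pv_mem_flat1 Z q hq with ⟨p, hpZ, hcase⟩
          obtain ⟨h1, h2⟩ := List.of_mem_zip hpZ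
          rcases hcase with h | h <;> rw [h]
          · have := hbnda p.1 h1; omega
          · have := hbndb p.2 h2; omega)
        (fun x hx => by have := hbnda x (List.mem_of_mem_filter hx); omega)
        (fun y hy => by have := hbndb y (List.mem_of_mem_filter hy); omega)
        hc2'
      rw [hclass1, hclass0]
      -- ===== arithmetic: floordiv (S0+S1) 2 = floordiv (T0+T1) 4 with T = 2S =====
      have hpar0 : ∀ p ∈ ((PySem.List.sorted (a.filter (fun x => PySem.Int.mod x 2 == 0)) (fun x => x) false).zip
          (PySem.List.sorted (b.filter (fun x => PySem.Int.mod x 2 == 0)) (fun x => x) false)),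
          (p.1 - p.2) % 2 = 0 := by
        intro p hp
        obtain ⟨h1, h2⟩ := List.of_mem_zip hp
        have e1 := (List.mem_filter.mp ((PySem.List.mem_sorted _ _ _ _).mp h1)).2
        have e2 := (List.mem_filter.mp ((PySem.List.mem_sorted _ _ _ _).mp h2)).2
        simp only [PySem.Int.mod_eq_zero_iff_dvd, beq_iff_eq] at e1 e2
        omega
      have hpar1 : ∀ p ∈ ((PySem.List.sorted (a.filter (fun x => !(PySem.Int.mod x 2 == 0))) (fun x => x) false).zip
          (PySem.List.sorted (b.filter (fun x => !(PySem.Int.mod x 2 == 0))) (fun x => x) false)),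
          (p.1 - p.2) % 2 = 0 := by
        intro p hp
        obtain ⟨h1, h2⟩ := List.of_mem_zip hp
        have e1 := (List.mem_filter.mp ((PySem.List.mem_sorted _ _ _ _).mp h1)).2
        have e2 := (List.mem_filter.mp ((PySem.List.mem_sorted _ _ _ _).mp h2)).2
        simp only [Bool.not_eq_eq_eq_not, Bool.not_true, beq_eq_false_iff_ne, ne_eq,
          PySem.Int.mod_eq_zero_iff_dvd] at e1 e2
        omega
      have hd0 := pv_double_half _ hpar0
      have hd1 := pv_double_half _ hpar1
      rw [PySem.Int.floordiv_eq_ediv_of_pos (by norm_num),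
        PySem.Int.floordiv_eq_ediv_of_pos (by norm_num)]
      omega
    · rw [if_pos (Or.inr hc2),
        if_pos (Or.inr (by rw [hsnd0]; intro h; exact hc2 (by omega)))]
  · rw [if_pos (Or.inl (sub_ne_zero.mpr hc1)), if_pos (Or.inl (sub_ne_zero.mpr hc1))]
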